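-- pv_equiv track=rewrite | github.com/patrickchugh/terravision | tests/validation_helpers.py | validate_gcp_hierarchy_integrity
-- ===== SOURCE A (Python) =====
-- from typing import Dict, List, Any
--
-- def validate_gcp_hierarchy_integrity(tfdata: Dict[str, Any]) -> List[str]:
--     """
--     Validate GCP hierarchy integrity (FR-008a, FR-008b).
--
--     Ensures complete hierarchy chain is respected:
--     Project → VPC → Region → Subnet → Zone → Resources
--
--     Args:
--         tfdata: Terraform data dictionary containing graphdict
--
--     Returns:
--         List of error messages (empty if valid)
--
--     Requirements:
--         - FR-008a/FR-008b: No hierarchy gaps - each level must have appropriate parent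
--     """
--     errors = []
--     graphdict = tfdata.get("graphdict", {})
--
--     # Define GCP hierarchy rules: child_type → list of valid parent types
--     hierarchy_rules = {
--         "tv_gcp_zone.": {
--             "valid_parents": ["google_compute_subnetwork."],
--             "error_template": "Zone {node} has no subnet parent (FR-008a violation: "
--             "zones MUST have subnet parent in GCP hierarchy)",
--         },
--         "google_compute_subnetwork.": {
--             "valid_parents": ["google_compute_network.", "tv_gcp_region."],
--             "error_template": "Subnet {node} has no region/VPC parent (FR-008b violation: "
--             "subnets MUST have region or VPC parent in GCP hierarchy)",
--         },
--         "tv_gcp_region.": {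
--             "valid_parents": ["google_compute_network.", "google_project."],
--             "error_template": "Region {node} has no VPC/Project parent (FR-008b violation: "
--             "regions MUST have VPC or Project parent in GCP hierarchy)",
--         },
--         "google_compute_network.": {
--             "valid_parents": ["google_project.", "tv_gcp_account."],
--             "error_template": "VPC {node} has no Project/Account parent (FR-008b violation: "
--             "VPCs MUST have Project or Account parent in GCP hierarchy)",
--         },
--     }
--
--     # Check each node type for proper parent
--     for node in graphdict:
--         for node_prefix, rule in hierarchy_rules.items():
--             if node.startswith(node_prefix):
--                 has_valid_parent = False
--                 for parent, children in graphdict.items():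
--                     if node in children:
--                         # Check if parent matches any valid parent type
--                         for valid_prefix in rule["valid_parents"]:
--                             if parent.startswith(valid_prefix):
--                                 has_valid_parent = True
--                                 break
--                     if has_valid_parent:
--                         break
--
--                 if not has_valid_parent:
--                     errors.append(rule["error_template"].format(node=node))
--                 break  # Only check once per node
--
--     return errors
-- ===== SOURCE B (Python) =====
-- from typing import Dict, List, Any
--
-- _GCP_RULES = [
--     ("tv_gcp_zone.", ("google_compute_subnetwork.",),
--      "Zone {node} has no subnet parent (FR-008a violation: "
--      "zones MUST have subnet parent in GCP hierarchy)"),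
--     ("google_compute_subnetwork.", ("google_compute_network.", "tv_gcp_region."),
--      "Subnet {node} has no region/VPC parent (FR-008b violation: "
--      "subnets MUST have region or VPC parent in GCP hierarchy)"),
--     ("tv_gcp_region.", ("google_compute_network.", "google_project."),
--      "Region {node} has no VPC/Project parent (FR-008b violation: "
--      "regions MUST have VPC or Project parent in GCP hierarchy)"),
--     ("google_compute_network.", ("google_project.", "tv_gcp_account."),
--      "VPC {node} has no Project/Account parent (FR-008b violation: "
--      "VPCs MUST have Project or Account parent in GCP hierarchy)"),
-- ]
--
--
-- def _rule_for(node):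
--     for rule in _GCP_RULES:
--         if node.startswith(rule[0]):
--             return rule
--     return None
--
--
-- def validate_gcp_hierarchy_integrity(tfdata: Dict[str, Any]) -> List[str]:
--     graphdict = tfdata.get("graphdict", {})
--
--     # Pass 1: walk the edges once, recording every child that has a valid parent.
--     satisfied = set()
--     for parent, children in graphdict.items():
--         for child in children:
--             rule = _rule_for(child)
--             if rule is not None and parent.startswith(rule[1]):
--                 satisfied.add(child)
--
--     # Pass 2: one error per governed node that no edge satisfied.
--     errors = []
--     for node in graphdict:
--         rule = _rule_for(node)
--         if rule is not None and node not in satisfied: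
--             errors.append(rule[2].format(node=node))
--     return errors
-- ===== Notes on version B (the rewrite author's own statement) =====
-- stated objective: alternative
-- what changed: Edge-driven two-pass rewrite: one pass over the edges builds a satisfied-set (eliminating A's per-node rescan of all parents), then one pass over the nodes emits an error for each governed node not in the set.
import Mathlib
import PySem

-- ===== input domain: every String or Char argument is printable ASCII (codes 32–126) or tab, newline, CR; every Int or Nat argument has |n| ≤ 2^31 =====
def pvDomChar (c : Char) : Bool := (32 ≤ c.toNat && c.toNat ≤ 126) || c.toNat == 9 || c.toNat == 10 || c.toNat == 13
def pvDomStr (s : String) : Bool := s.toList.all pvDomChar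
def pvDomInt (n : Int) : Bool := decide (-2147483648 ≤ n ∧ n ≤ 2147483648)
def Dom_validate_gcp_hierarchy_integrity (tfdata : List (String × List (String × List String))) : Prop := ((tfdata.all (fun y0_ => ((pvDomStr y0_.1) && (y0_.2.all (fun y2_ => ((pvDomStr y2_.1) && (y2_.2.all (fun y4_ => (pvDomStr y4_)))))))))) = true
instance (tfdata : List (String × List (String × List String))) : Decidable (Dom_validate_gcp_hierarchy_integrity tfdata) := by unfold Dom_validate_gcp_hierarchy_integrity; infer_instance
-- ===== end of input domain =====

-- ===== PORT A =====
-- B replaces A's per-node rescan of all parents by one edge pass building a satisfied-set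
-- plus one node pass emitting errors (objective: alternative decomposition).

-- the shared hierarchy-rule table: (child prefix, valid parent prefixes, error template)
def gcpRules : List (String × List String × (String → String)) :=
  [ ("tv_gcp_zone.", ["google_compute_subnetwork."],
      fun node => "Zone " ++ node ++ " has no subnet parent (FR-008a violation: zones MUST have subnet parent in GCP hierarchy)"),
    ("google_compute_subnetwork.", ["google_compute_network.", "tv_gcp_region."],
      fun node => "Subnet " ++ node ++ " has no region/VPC parent (FR-008b violation: subnets MUST have region or VPC parent in GCP hierarchy)"),
    ("tv_gcp_region.", ["google_compute_network.", "google_project."],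
      fun node => "Region " ++ node ++ " has no VPC/Project parent (FR-008b violation: regions MUST have VPC or Project parent in GCP hierarchy)"),
    ("google_compute_network.", ["google_project.", "tv_gcp_account."],
      fun node => "VPC " ++ node ++ " has no Project/Account parent (FR-008b violation: VPCs MUST have Project or Account parent in GCP hierarchy)") ]

-- A's inner rule loop with its break: first matching prefix decides, then scan all parents
def pvA_checkNode (graphdict : List (String × List String)) (node : String) :
    List (String × List String × (String → String)) → List String
  | [] => []
  | (pre, vps, tmpl) :: rest =>
    if PySem.Str.startswith node pre then
      -- 'for parent, children in graphdict.items(): if node in children: … break'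
      let has_valid_parent :=
        graphdict.any (fun pc => pc.2.contains node && vps.any (fun vp => PySem.Str.startswith pc.1 vp))
      if has_valid_parent then [] else [tmpl node]
    else pvA_checkNode graphdict node rest

def validate_gcp_hierarchy_integrity (tfdata : List (String × List (String × List String))) : List String :=
  let graphdict := (List.lookup "graphdict" tfdata).getD []
  graphdict.foldl (fun (errors : List String) (p : String × List String) => errors ++ pvA_checkNode graphdict p.1 gcpRules) []

-- ===== PORT B =====
-- Source B's _rule_for: first rule whose prefix matches, else none
def pvB_ruleFor : String → List (String × List String × (String → String)) →
    Option (String × List String × (String → String))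
  | _, [] => none
  | node, r :: rest => if PySem.Str.startswith node r.1 then some r else pvB_ruleFor node rest

def validate_gcp_hierarchy_integrity_alt (tfdata : List (String × List (String × List String))) : List String :=
  let graphdict := (List.lookup "graphdict" tfdata).getD []
  -- pass 1: edge scan building the satisfied set
  let satisfied : PySem.Set String :=
    graphdict.foldl (fun (s : PySem.Set String) (pc : String × List String) =>
      pc.2.foldl (fun s child =>
        match pvB_ruleFor child gcpRules with
        | some r => if r.2.1.any (fun vp => PySem.Str.startswith pc.1 vp) then PySem.Set.add s child else s
        | none => s) s) PySem.Set.empty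
  -- pass 2: node scan emitting errors
  graphdict.foldl (fun (errors : List String) (p : String × List String) =>
    match pvB_ruleFor p.1 gcpRules with
    | some r => if PySem.Set.contains satisfied p.1 then errors else errors ++ [r.2.2 p.1]
    | none => errors) []

-- ===== PRECONDITION & SPEC =====
def Spec_validate_gcp_hierarchy_integrity (tfdata : List (String × List (String × List String))) (out : List String) : Prop := out = validate_gcp_hierarchy_integrity_alt tfdata
instance (tfdata : List (String × List (String × List String))) (out : List String) : Decidable (Spec_validate_gcp_hierarchy_integrity tfdata out) := by unfold Spec_validate_gcp_hierarchy_integrity; infer_instance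

-- ===== CLAIM (what is proved, stated in full; the proofs are below) =====
def Claim_equal_validate_gcp_hierarchy_integrity : Prop := ∀ (tfdata : List (String × List (String × List String))), Dom_validate_gcp_hierarchy_integrity tfdata → Spec_validate_gcp_hierarchy_integrity tfdata (validate_gcp_hierarchy_integrity tfdata)

-- ===== LEMMAS AND PROOFS =====

-- whether an edge parent→node satisfies node's (first-matching) rule
def pvCond (node parent : String) : Bool :=
  match pvB_ruleFor node gcpRules with
  | some r => r.2.1.any (fun vp => PySem.Str.startswith parent vp)
  | none => false

theorem pv_contains_add (s : PySem.Set String) (c node : String) :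
    PySem.Set.contains (PySem.Set.add s c) node = (PySem.Set.contains s node || (c == node)) := by
  simp only [PySem.Set.add, PySem.Set.contains]
  by_cases h : c = node <;> split_ifs with hs <;>
    simp_all [eq_comm (a := node) (b := c), beq_iff_eq]

theorem pv_step (parent : String) (s : PySem.Set String) (c node : String) :
    PySem.Set.contains
      (match pvB_ruleFor c gcpRules with
       | some r => if r.2.1.any (fun vp => PySem.Str.startswith parent vp) then PySem.Set.add s c else s
       | none => s) node
    = (PySem.Set.contains s node || ((c == node) && pvCond c parent)) := by
  unfold pvCond
  cases h : pvB_ruleFor c gcpRules with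
  | none => simp
  | some r =>
    by_cases hv : (r.2.1.any (fun vp => PySem.Str.startswith parent vp)) = true
    · simp only [hv, if_true, pv_contains_add, Bool.and_true]
    · rw [Bool.not_eq_true] at hv
      simp only [PySem.Str.startswith_eq] at hv
      simp [hv]

theorem pv_children_foldl (parent : String) (children : List String)
    (s : PySem.Set String) (node : String) :
    PySem.Set.contains
      (children.foldl (fun s child =>
        match pvB_ruleFor child gcpRules with
        | some r => if r.2.1.any (fun vp => PySem.Str.startswith parent vp) then PySem.Set.add s child else s
        | none => s) s) node
    = (PySem.Set.contains s node || (children.contains node && pvCond node parent)) := by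
  induction children generalizing s with
  | nil => simp
  | cons c cs ih =>
    rw [List.foldl_cons, ih, pv_step]
    by_cases hc : c = node
    · subst hc
      cases hs : PySem.Set.contains s c <;> cases hp : pvCond c parent <;>
        simp
    · have hb : (c == node) = false := by simp [hc]
      simp [hb, Ne.symm hc]

theorem pv_satisfied (gd : List (String × List String)) (s : PySem.Set String) (node : String) :
    PySem.Set.contains
      (gd.foldl (fun (s : PySem.Set String) (pc : String × List String) =>
        pc.2.foldl (fun s child =>
          match pvB_ruleFor child gcpRules with
          | some r => if r.2.1.any (fun vp => PySem.Str.startswith pc.1 vp) then PySem.Set.add s child else s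
          | none => s) s) s) node
    = (PySem.Set.contains s node || gd.any (fun pc => pc.2.contains node && pvCond node pc.1)) := by
  induction gd generalizing s with
  | nil => simp
  | cons pc rest ih =>
    rw [List.foldl_cons, ih, pv_children_foldl, List.any_cons]
    cases PySem.Set.contains s node <;> simp

-- A's rule loop equals: find the first matching rule, then one existential scan
theorem pv_checkNode_eq (gd : List (String × List String)) (node : String)
    (rs : List (String × List String × (String → String))) :
    pvA_checkNode gd node rs
    = match pvB_ruleFor node rs with
      | some r =>
          if gd.any (fun pc => pc.2.contains node && r.2.1.any (fun vp => PySem.Str.startswith pc.1 vp))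
          then [] else [r.2.2 node]
      | none => [] := by
  induction rs with
  | nil => rfl
  | cons r rest ih =>
    unfold pvA_checkNode pvB_ruleFor
    by_cases h : PySem.Str.startswith node r.1 = true
    · rw [if_pos h, if_pos h]
    · rw [if_neg h, if_neg h, ih]

-- ===== VERDICT (by name: the statement is the Claim_ definition above) =====
theorem validate_gcp_hierarchy_integrity_spec : Claim_equal_validate_gcp_hierarchy_integrity := by
  intro tfdata _
  unfold Spec_validate_gcp_hierarchy_integrity
  unfold validate_gcp_hierarchy_integrity validate_gcp_hierarchy_integrity_alt
  set gd := (List.lookup "graphdict" tfdata).getD [] with hgd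
  apply PySem.List.foldl_congr_mem
  intro acc p _
  rw [pv_checkNode_eq, pv_satisfied]
  cases h : pvB_ruleFor p.1 gcpRules with
  | none => simp
  | some r =>
    have hany : (gd.any fun pc => pc.2.contains p.1 && pvCond p.1 pc.1)
         = gd.any fun pc => pc.2.contains p.1 && r.2.1.any fun vp => PySem.Str.startswith pc.1 vp := by
      simp only [pvCond, h]
    simp only [PySem.Set.empty, PySem.Set.contains, List.contains_nil, Bool.false_or, hany]
    split_ifs <;> simp
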